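-- pv_equiv track=rewrite | github.com/adnathanail/aoc | 2024/day21/part1.py | check_instructions_dont_cross_bad_key
-- ===== SOURCE A (Python) =====
-- def check_instructions_dont_cross_bad_key(key_poss, code):
--     loc = key_poss["A"]
--     for char in code:
--         if char == ">":
--             loc = (loc[0] + 1, loc[1])
--         elif char == "v":
--             loc = (loc[0], loc[1] + 1)
--         elif char == "<":
--             loc = (loc[0] - 1, loc[1])
--         elif char == "^":
--             loc = (loc[0], loc[1] - 1)
--         if loc == key_poss[None]:
--             return False
--     return True
-- ===== SOURCE B (Python) =====
-- def check_instructions_dont_cross_bad_key(key_poss, code):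
--     # Closed form: position after i chars = start + (#'>' - #'<', #'v' - #'^') in code[:i].
--     sx, sy = key_poss["A"]
--     bad = key_poss[None]
--     return not any(
--         (sx + code[:i].count(">") - code[:i].count("<"),
--          sy + code[:i].count("v") - code[:i].count("^")) == bad
--         for i in range(1, len(code) + 1))
-- ===== Notes on version B (the rewrite author's own statement) =====
-- stated objective: alternative
-- what changed: B drops A's stateful step-by-step simulation entirely: it uses the closed form position-after-i-chars = start + (count('>')-count('<'), count('v')-count('^')) over the prefix code[:i], and tests every prefix with any(); no running location is maintained.
-- outside the precondition, e.g. on check_instructions_dont_cross_bad_key({'A': (0, 0)}, ''): A returns True, B raises KeyError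
import Mathlib
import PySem

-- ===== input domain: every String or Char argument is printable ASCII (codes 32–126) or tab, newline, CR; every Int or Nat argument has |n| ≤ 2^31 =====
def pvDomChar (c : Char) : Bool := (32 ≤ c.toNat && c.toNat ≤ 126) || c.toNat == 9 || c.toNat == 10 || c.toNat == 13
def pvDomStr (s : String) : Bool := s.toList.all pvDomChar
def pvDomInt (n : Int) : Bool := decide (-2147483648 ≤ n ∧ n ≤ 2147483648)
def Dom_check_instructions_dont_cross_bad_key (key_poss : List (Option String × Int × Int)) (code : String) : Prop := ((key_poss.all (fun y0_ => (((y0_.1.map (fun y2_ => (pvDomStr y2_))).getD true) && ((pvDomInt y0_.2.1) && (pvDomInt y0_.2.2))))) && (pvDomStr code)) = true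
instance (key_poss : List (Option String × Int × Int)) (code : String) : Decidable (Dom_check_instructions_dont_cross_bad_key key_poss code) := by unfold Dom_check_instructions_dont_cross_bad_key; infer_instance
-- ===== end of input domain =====

-- B replaces A's stateful step-by-step simulation by the closed form
-- "position after i chars = start + (#'>' - #'<', #'v' - #'^') over code[:i]",
-- testing every prefix by counting (objective: alternative; no running location state).

-- ===== PORT A =====
-- A's for-loop: move loc per branch chain, look up key_poss[None] and early-return False on hit.
def pvALoop (key_poss : List (Option String × Int × Int)) (loc : Int × Int) : List Char → Bool
  | [] => true
  | c :: rest =>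
    let loc' :=
      if c = '>' then (loc.1 + 1, loc.2)
      else if c = 'v' then (loc.1, loc.2 + 1)
      else if c = '<' then (loc.1 - 1, loc.2)
      else if c = '^' then (loc.1, loc.2 - 1)
      else loc
    match PySem.Dict.get? (PySem.Dict.mk key_poss) none with
    | none => false  -- KeyError in Python; excluded by Pre_
    | some bad => if loc' = bad then false else pvALoop key_poss loc' rest

def check_instructions_dont_cross_bad_key (key_poss : List (Option String × Int × Int)) (code : String) : Bool :=
  match PySem.Dict.get? (PySem.Dict.mk key_poss) (some "A") with
  | none => false  -- KeyError in Python; excluded by Pre_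
  | some loc => pvALoop key_poss loc code.toList

-- ===== PORT B =====
-- Source B's closed form for one prefix code[:i] (i ≥ 0, so the slice is 'take'):
-- (sx + code[:i].count(">") - code[:i].count("<"), sy + code[:i].count("v") - code[:i].count("^"))
def pvPrefixPos (s : Int × Int) (pre : List Char) : Int × Int :=
  (s.1 + (pre.count '>' : Int) - (pre.count '<' : Int),
   s.2 + (pre.count 'v' : Int) - (pre.count '^' : Int))

def check_instructions_dont_cross_bad_key_alt (key_poss : List (Option String × Int × Int)) (code : String) : Bool :=
  match PySem.Dict.get? (PySem.Dict.mk key_poss) (some "A"), PySem.Dict.get? (PySem.Dict.mk key_poss) none with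
  | some s, some bad =>
      let cs := code.toList
      -- not any(... == bad for i in range(1, len(code)+1))
      !((PySem.List.pyRange 1 ((cs.length : Int) + 1) 1).any
          (fun i => decide (pvPrefixPos s (cs.take i.toNat) = bad)))
  | _, _ => false  -- KeyError in Python; excluded by Pre_

-- ===== PRECONDITION & SPEC =====
-- Pre_ requires both the "A" and the None key to be present: otherwise Python raises KeyError
-- (A always for a missing "A" key, and for a missing None key whenever code is nonempty;
-- on the remaining corner — missing None key with empty code — A returns True but B's
-- upfront key_poss[None] lookup raises, so that corner is excluded too).
def Pre_check_instructions_dont_cross_bad_key (key_poss : List (Option String × Int × Int)) (code : String) : Prop :=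
  (PySem.Dict.get? (PySem.Dict.mk key_poss) (some "A")).isSome = true ∧ (PySem.Dict.get? (PySem.Dict.mk key_poss) none).isSome = true
instance (key_poss : List (Option String × Int × Int)) (code : String) : Decidable (Pre_check_instructions_dont_cross_bad_key key_poss code) := by unfold Pre_check_instructions_dont_cross_bad_key; infer_instance

def pvWitness_check_instructions_dont_cross_bad_key : (List (Option String × Int × Int)) × String :=
  ([(some "A", (2, 0)), (none, (0, 0)), (some "0", (1, 1))], "<v")

def Spec_check_instructions_dont_cross_bad_key (key_poss : List (Option String × Int × Int)) (code : String) (out : Bool) : Prop := out = check_instructions_dont_cross_bad_key_alt key_poss code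
instance (key_poss : List (Option String × Int × Int)) (code : String) (out : Bool) : Decidable (Spec_check_instructions_dont_cross_bad_key key_poss code out) := by unfold Spec_check_instructions_dont_cross_bad_key; infer_instance

-- ===== CLAIM (what is proved, stated in full; the proofs are below) =====
def Claim_equal_check_instructions_dont_cross_bad_key : Prop := ∀ (key_poss : List (Option String × Int × Int)) (code : String), Dom_check_instructions_dont_cross_bad_key key_poss code → Pre_check_instructions_dont_cross_bad_key key_poss code → Spec_check_instructions_dont_cross_bad_key key_poss code (check_instructions_dont_cross_bad_key key_poss code)

-- ===== LEMMAS AND PROOFS =====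

-- A's per-character step, as a proof-side function
def pvStep (loc : Int × Int) (c : Char) : Int × Int :=
  if c = '>' then (loc.1 + 1, loc.2)
  else if c = 'v' then (loc.1, loc.2 + 1)
  else if c = '<' then (loc.1 - 1, loc.2)
  else if c = '^' then (loc.1, loc.2 - 1)
  else loc

-- the closed form absorbs one leading character into the start position
theorem pvPrefixPos_cons (s : Int × Int) (c : Char) (pre : List Char) :
    pvPrefixPos s (c :: pre) = pvPrefixPos (pvStep s c) pre := by
  unfold pvPrefixPos pvStep
  by_cases h1 : c = '>'
  · subst h1; simp; omega
  by_cases h2 : c = 'v'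
  · subst h2; simp [h1]; omega
  by_cases h3 : c = '<'
  · subst h3; simp [h1, h2]; omega
  by_cases h4 : c = '^'
  · subst h4; simp [h1, h2, h3]; omega
  · simp [h1, h2, h3, h4]

theorem pvPrefixPos_nil (s : Int × Int) : pvPrefixPos s [] = s := by
  unfold pvPrefixPos; simp

-- main invariant: A's interleaved loop decides "no prefix of length 1..n lands on bad",
-- with the prefix position given by the closed form
theorem pv_loop_eq (key_poss : List (Option String × Int × Int)) (bad : Int × Int)
    (hbad : PySem.Dict.get? (PySem.Dict.mk key_poss) none = some bad) :
    ∀ (cs : List Char) (s : Int × Int),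
      pvALoop key_poss s cs
        = !((List.range cs.length).any (fun k => decide (pvPrefixPos s (cs.take (k + 1)) = bad))) := by
  intro cs
  induction cs with
  | nil => intro s; simp [pvALoop]
  | cons c rest ih =>
    intro s
    rw [pvALoop, hbad]
    have hstep : (if c = '>' then (s.1 + 1, s.2)
      else if c = 'v' then (s.1, s.2 + 1)
      else if c = '<' then (s.1 - 1, s.2)
      else if c = '^' then (s.1, s.2 - 1)
      else s) = pvStep s c := rfl
    rw [hstep]
    have hr : List.range (rest.length + 1) = 0 :: (List.range rest.length).map Nat.succ :=
      List.range_succ_eq_map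
    by_cases h : pvStep s c = bad
    · simp only [List.length_cons, hr, List.any_cons, List.take_succ_cons, List.take_zero]
      simp [h, pvPrefixPos_cons, pvPrefixPos_nil]
    · simp only [List.length_cons, hr, List.any_cons, List.take_succ_cons, List.take_zero,
        List.any_map]
      have h0 : pvPrefixPos s [c] = pvStep s c := by
        rw [pvPrefixPos_cons, pvPrefixPos_nil]
      simp only [h0, h, decide_false, Bool.false_or, ih (pvStep s c), pvPrefixPos_cons]
      rfl

-- bridge: Source B's range(1, n+1) with take i.toNat is range n with take (k+1)
theorem pv_range_bridge (f : Int → Bool) (n : Nat) :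
    (PySem.List.pyRange 1 ((n : Int) + 1) 1).any f
      = (List.range n).any (fun k => f ((k : Int) + 1)) := by
  rw [PySem.List.pyRange_one]
  have : ((n : Int) + 1 - 1).toNat = n := by omega
  rw [this, List.any_map]
  congr 1
  funext k
  simp [Function.comp, add_comm]

-- ===== VERDICT (by name: the statement is the Claim_ definition above) =====
theorem check_instructions_dont_cross_bad_key_spec : Claim_equal_check_instructions_dont_cross_bad_key := by
  intro key_poss code _ hpre
  obtain ⟨hA, hN⟩ := hpre
  unfold Spec_check_instructions_dont_cross_bad_key
  unfold check_instructions_dont_cross_bad_key check_instructions_dont_cross_bad_key_alt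
  obtain ⟨start, hstart⟩ := Option.isSome_iff_exists.mp hA
  obtain ⟨bad, hbad⟩ := Option.isSome_iff_exists.mp hN
  rw [hstart, hbad]
  show pvALoop key_poss start code.toList
    = !((PySem.List.pyRange 1 ((code.toList.length : Int) + 1) 1).any
        (fun i => decide (pvPrefixPos start (code.toList.take i.toNat) = bad)))
  rw [pv_loop_eq key_poss bad hbad code.toList start]
  rw [pv_range_bridge]
  congr 2
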